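-- pv_equiv track=rewrite | github.com/drewtuley/UniTeasers | Jan14_2020.py | replace_wildcards
-- ===== SOURCE A (Python) =====
-- def replace_wildcards(source_word, replacements):
--     return_word = ''
--     replaced_letters = ''
--     index = 0
--     for letter in source_word:
--         if letter == '?':
--             return_word += replacements[index]
--             replaced_letters += replacements[index]
--             index += 1
--         else:
--             return_word += letter
--     return return_word, replaced_letters
-- ===== SOURCE B (Python) =====
-- def replace_wildcards(source_word, replacements):
--     parts = source_word.split('?')
--     replaced_letters = replacements[:len(parts) - 1]
--     pieces = [parts[0]]
--     for part, ch in zip(parts[1:], replaced_letters):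
--         pieces.append(ch)
--         pieces.append(part)
--     return ''.join(pieces), replaced_letters
-- ===== Notes on version B (the rewrite author's own statement) =====
-- stated objective: faster
-- what changed: A's character-by-character pass with a running replacement index and string += accumulation is replaced by split-then-interleave: split the word on '?', slice the first len(parts)-1 replacement characters as replaced_letters, and rebuild the word by joining the fragments interleaved with those characters.
import Mathlib
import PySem

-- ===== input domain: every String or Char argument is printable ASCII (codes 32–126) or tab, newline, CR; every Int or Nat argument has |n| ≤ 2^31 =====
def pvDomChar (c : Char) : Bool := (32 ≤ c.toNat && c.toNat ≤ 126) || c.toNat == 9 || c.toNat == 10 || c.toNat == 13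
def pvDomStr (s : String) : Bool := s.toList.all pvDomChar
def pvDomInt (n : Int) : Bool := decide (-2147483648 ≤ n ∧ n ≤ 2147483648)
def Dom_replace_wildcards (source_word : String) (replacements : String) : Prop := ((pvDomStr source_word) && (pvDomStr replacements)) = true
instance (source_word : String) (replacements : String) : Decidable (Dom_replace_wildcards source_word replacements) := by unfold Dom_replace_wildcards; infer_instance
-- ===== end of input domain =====

-- B replaces A's character-by-character pass with a running index and += accumulation by
-- split-then-interleave: split on '?', slice off the needed replacement characters, join
-- (objective: faster in a timing run — join-based construction instead of repeated string +=).

-- ===== PORT A =====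
-- A's for-loop over source_word with state (return_word, replaced_letters, index);
-- replacements[index] may raise IndexError, modelled by Option (none outside Pre_).
def loopA (repl : List Char) : List Char → List Char × List Char × Int → Option (List Char × List Char × Int)
  | [], st => some st
  | letter :: rest, (rw, rl, index) =>
    if letter = '?' then
      match PySem.List.pyGet? repl index with
      | some c => loopA repl rest (rw ++ [c], rl ++ [c], index + 1)
      | none => none
    else loopA repl rest (rw ++ [letter], rl, index)

def replace_wildcards (source_word : String) (replacements : String) : String × String :=
  match loopA replacements.toList source_word.toList ([], [], 0) with
  | some (rw, rl, _) => (String.ofList rw, String.ofList rl)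
  | none => ("", "")

-- ===== PORT B =====
-- parts = source_word.split('?'); replaced_letters = replacements[:len(parts)-1];
-- pieces = [parts[0]] then append ch, part for each zipped pair; ''.join(pieces).
-- (the [] branch of the match is unreachable: split always returns at least one piece)
def replace_wildcards_alt (source_word : String) (replacements : String) : String × String :=
  let parts := PySem.Chars.splitOn source_word.toList ['?']
  let chunks := PySem.List.slice replacements.toList none (some ((parts.length - 1 : Nat) : Int))
  match parts with
  | p0 :: ps =>
    let pieces := ((ps.zip chunks).foldl (fun acc pc => acc ++ [[pc.2], pc.1]) [p0])
    (String.ofList (PySem.Chars.join [] pieces), String.ofList chunks)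
  | [] => ("", "")

-- ===== PRECONDITION & SPEC =====
-- A raises IndexError when source_word has more '?' than replacements has characters.
def Pre_replace_wildcards (source_word : String) (replacements : String) : Prop :=
  source_word.toList.count '?' ≤ replacements.toList.length
instance (source_word : String) (replacements : String) : Decidable (Pre_replace_wildcards source_word replacements) := by unfold Pre_replace_wildcards; infer_instance
def pvWitness_replace_wildcards : String × String := ("c?mp?ter", "ou")

def Spec_replace_wildcards (source_word : String) (replacements : String) (out : String × String) : Prop := out = replace_wildcards_alt source_word replacements
instance (source_word : String) (replacements : String) (out : String × String) : Decidable (Spec_replace_wildcards source_word replacements out) := by unfold Spec_replace_wildcards; infer_instance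

-- ===== CLAIM (what is proved, stated in full; the proofs are below) =====
def Claim_equal_replace_wildcards : Prop := ∀ (source_word : String) (replacements : String), Dom_replace_wildcards source_word replacements → Pre_replace_wildcards source_word replacements → Spec_replace_wildcards source_word replacements (replace_wildcards source_word replacements)

-- ===== LEMMAS AND PROOFS =====

-- reference description of splitting on '?' (proof-side only)
def mySplit (pre : List Char) : List Char → List (List Char)
  | [] => [pre]
  | c :: rest => if c = '?' then pre :: mySplit [] rest else mySplit (pre ++ [c]) rest

-- reference interleaving (proof-side only): what A's interleaved pass produces
def rebuildB : List Char → List Char → List Char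
  | [], _ => []
  | letter :: rest, chunks =>
    if letter = '?' then
      match chunks with
      | c :: chunks' => c :: rebuildB rest chunks'
      | [] => rebuildB rest []
    else letter :: rebuildB rest chunks

theorem loopA_cons_q (repl rest rw rl : List Char) (index : Int) (c : Char)
    (h : PySem.List.pyGet? repl index = some c) :
    loopA repl ('?' :: rest) (rw, rl, index) = loopA repl rest (rw ++ [c], rl ++ [c], index + 1) := by
  simp [loopA, h]

theorem loopA_cons_other (repl rest rw rl : List Char) (index : Int) (c : Char) (hc : c ≠ '?') :
    loopA repl (c :: rest) (rw, rl, index) = loopA repl rest (rw ++ [c], rl, index) := by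
  simp [loopA, hc]

theorem loopA_spec (repl : List Char) (src : List Char) (rw rl : List Char) (i : Nat)
    (h : i + src.count '?' ≤ repl.length) :
    loopA repl src (rw, rl, (i : Int)) =
      some (rw ++ rebuildB src ((repl.drop i).take (src.count '?')),
            rl ++ (repl.drop i).take (src.count '?'),
            (i : Int) + src.count '?') := by
  induction src generalizing rw rl i with
  | nil => simp [loopA, rebuildB]
  | cons c rest ih =>
    by_cases hc : c = '?'
    · subst hc
      have hcnt : ('?' :: rest).count '?' = rest.count '?' + 1 := by simp
      have hi : i < repl.length := by rw [hcnt] at h; omega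
      have hget : PySem.List.pyGet? repl (i : Int) = some repl[i] := by
        rw [PySem.List.pyGet?_natCast, List.getElem?_eq_getElem hi]
      have hcast : (i : Int) + 1 = ((i + 1 : Nat) : Int) := by push_cast; ring
      rw [loopA_cons_q repl rest rw rl (i : Int) repl[i] hget, hcast,
        ih (rw ++ [repl[i]]) (rl ++ [repl[i]]) (i + 1) (by rw [hcnt] at h; omega)]
      have hdrop : (repl.drop i).take (('?' :: rest).count '?')
          = repl[i] :: (repl.drop (i + 1)).take (rest.count '?') := by
        rw [hcnt, List.drop_eq_getElem_cons hi, List.take_succ_cons]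
      rw [hdrop]
      simp only [rebuildB, if_true, hcnt]
      simp only [Option.some.injEq, Prod.mk.injEq]
      refine ⟨by simp, by simp, by push_cast; ring⟩
    · have hcnt : (c :: rest).count '?' = rest.count '?' := by simp [hc]
      rw [loopA_cons_other repl rest rw rl (i : Int) c hc,
        ih (rw ++ [c]) rl i (by rw [hcnt] at h; omega)]
      rw [hcnt]
      simp only [rebuildB, if_neg hc]
      simp

theorem splitOn_go_spec (fuel : Nat) (s cur : List Char) (acc : List (List Char))
    (hf : s.length ≤ fuel) :
    PySem.Chars.splitOn.go ['?'] fuel s cur acc = acc.reverse ++ mySplit cur.reverse s := by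
  induction s generalizing fuel cur acc with
  | nil =>
    cases fuel with
    | zero => simp [PySem.Chars.splitOn.go, mySplit]
    | succ n => simp [PySem.Chars.splitOn.go, mySplit]
  | cons c rest ih =>
    cases fuel with
    | zero => simp at hf
    | succ n =>
      by_cases hc : c = '?'
      · subst hc
        rw [PySem.Chars.splitOn.go]
        have hpre : ['?'].isPrefixOf ('?' :: rest) = true := by simp [List.isPrefixOf]
        rw [if_pos hpre]
        have hdrop : List.drop ['?'].length ('?' :: rest) = rest := by simp
        rw [hdrop]
        simp only [List.length_cons] at hf
        rw [ih n [] (cur.reverse :: acc) (by omega)]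
        simp [mySplit]
      · rw [PySem.Chars.splitOn.go]
        have hpre : ['?'].isPrefixOf (c :: rest) = false := by
          simp [List.isPrefixOf]; exact fun h => absurd h.symm hc
        rw [if_neg (by simp [hpre])]
        simp only [List.length_cons] at hf
        rw [ih n (c :: cur) acc (by omega)]
        simp [mySplit, hc]

theorem splitOn_eq_mySplit (s : List Char) :
    PySem.Chars.splitOn s ['?'] = mySplit [] s := by
  rw [PySem.Chars.splitOn]
  have := splitOn_go_spec (s.length + 1) s [] [] (by omega)
  simpa using this

theorem mySplit_length (s : List Char) (pre : List Char) :
    (mySplit pre s).length = s.count '?' + 1 := by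
  induction s generalizing pre with
  | nil => simp [mySplit]
  | cons c rest ih =>
    by_cases hc : c = '?'
    · subst hc; simp [mySplit, ih]
    · simp [mySplit, hc, ih]

theorem mySplit_ne_nil (s : List Char) (pre : List Char) : mySplit pre s ≠ [] := by
  have := mySplit_length s pre
  intro h; rw [h] at this; simp at this

theorem join_empty_flatten (xs : List (List Char)) : PySem.Chars.join [] xs = xs.flatten := by
  induction xs with
  | nil => exact PySem.Chars.join_nil []
  | cons a as ih =>
    cases as with
    | nil => simpa using PySem.Chars.join_singleton ([] : List Char) a
    | cons b bs =>
      rw [PySem.Chars.join_cons_cons, ih]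
      simp

-- the foldl building 'pieces' equals head ++ flatMap over the zip, after joining with ''
theorem join_fold_pieces (ps : List (List Char)) (cs : List Char) (p0 : List Char)
    (acc : List (List Char)) :
    PySem.Chars.join [] ((ps.zip cs).foldl (fun acc pc => acc ++ [[pc.2], pc.1]) acc) =
      PySem.Chars.join [] acc ++ (ps.zip cs).flatMap (fun pc => pc.2 :: pc.1) := by
  induction ps generalizing cs acc with
  | nil => simp
  | cons p ps ih =>
    cases cs with
    | nil => simp
    | cons c cs =>
      simp only [List.zip_cons_cons, List.foldl_cons, List.flatMap_cons] at *
      rw [ih cs (acc ++ [[c], p])]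
      simp [join_empty_flatten]

theorem glue_mySplit (s : List Char) (pre : List Char) (cs : List Char)
    (hcs : s.count '?' ≤ cs.length) :
    (match mySplit pre s with
      | p0 :: ps => p0 ++ (ps.zip cs).flatMap (fun pc => pc.2 :: pc.1)
      | [] => []) = pre ++ rebuildB s cs := by
  induction s generalizing pre cs with
  | nil => simp [mySplit, rebuildB]
  | cons c rest ih =>
    by_cases hc : c = '?'
    · subst hc
      have hcnt : ('?' :: rest).count '?' = rest.count '?' + 1 := by simp
      rw [hcnt] at hcs
      cases cs with
      | nil => simp at hcs
      | cons d ds =>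
        simp only [mySplit, if_pos rfl]
        obtain ⟨q0, qs, hq⟩ : ∃ q0 qs, mySplit ([] : List Char) rest = q0 :: qs := by
          cases h : mySplit ([] : List Char) rest with
          | nil => exact absurd h (mySplit_ne_nil rest [])
          | cons q0 qs => exact ⟨q0, qs, rfl⟩
        have := ih [] ds (by simpa using Nat.le_of_succ_le_succ hcs)
        rw [hq] at this ⊢
        simp only [List.zip_cons_cons, List.flatMap_cons, rebuildB, if_pos rfl]
        simp only [List.nil_append] at this
        simp [this]
    · have hcnt : (c :: rest).count '?' = rest.count '?' := by simp [hc]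
      rw [hcnt] at hcs
      simp only [mySplit, if_neg hc, rebuildB, if_neg hc]
      have := ih (pre ++ [c]) cs hcs
      rw [this]; simp

-- ===== VERDICT (by name: the statement is the Claim_ definition above) =====
theorem replace_wildcards_spec : Claim_equal_replace_wildcards := by
  intro src repl _ hpre
  unfold Spec_replace_wildcards
  unfold Pre_replace_wildcards at hpre
  unfold replace_wildcards replace_wildcards_alt
  have h0 : (0 : Nat) + src.toList.count '?' ≤ repl.toList.length := by omega
  have hA := loopA_spec repl.toList src.toList [] [] 0 h0
  simp only [Nat.cast_zero, List.drop_zero] at hA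
  rw [hA]
  simp only [splitOn_eq_mySplit]
  obtain ⟨p0, ps, hq⟩ : ∃ p0 ps, mySplit ([] : List Char) src.toList = p0 :: ps := by
    cases h : mySplit ([] : List Char) src.toList with
    | nil => exact absurd h (mySplit_ne_nil src.toList [])
    | cons p0 ps => exact ⟨p0, ps, rfl⟩
  have hlen : (mySplit ([] : List Char) src.toList).length - 1 = src.toList.count '?' := by
    rw [mySplit_length]; omega
  have hslice : PySem.List.slice repl.toList none
      (some (((mySplit ([] : List Char) src.toList).length - 1 : Nat) : Int))
      = repl.toList.take (src.toList.count '?') := by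
    rw [PySem.List.slice_to_natCast, hlen]
  have hchunks_len : src.toList.count '?' ≤ (repl.toList.take (src.toList.count '?')).length := by
    rw [List.length_take]; omega
  have hglue := glue_mySplit src.toList [] (repl.toList.take (src.toList.count '?')) hchunks_len
  rw [hq] at hglue
  rw [hslice]
  simp only [hq]
  rw [join_fold_pieces ps (repl.toList.take (src.toList.count '?')) p0 [p0]]
  have hjoin1 : PySem.Chars.join [] [p0] = p0 := by rw [join_empty_flatten]; simp
  rw [hjoin1]
  simp only [List.nil_append] at hglue
  rw [hglue]
  simp
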